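-- pv_equiv track=rewrite | github.com/GerganaTuleshkova/Study-SoftUni | 08_workshop/console_connect_four.py | get_down_left_diagonal_cells
-- ===== SOURCE A (Python) =====
-- def get_down_left_diagonal_cells(board, row, column, connect_count):
--     down_left_cells_values = []
--     down_index_max = min(row + connect_count - 1, len(board) - 1)
--     left_index_min = max(column - connect_count + 1, 0)
--     down_left_diagonal_range = min(down_index_max - row, column - left_index_min)
--     for addition in range(down_left_diagonal_range + 1):
--         down_left_cells_values.append(board[row + addition][column - addition])
--     return down_left_cells_values
-- ===== SOURCE B (Python) =====
-- def get_down_left_diagonal_cells(board, row, column, connect_count):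
--     if connect_count <= 0 or row >= len(board) or column < 0:
--         return []
--     return [board[row][column]] + get_down_left_diagonal_cells(board, row + 1, column - 1, connect_count - 1)
-- ===== Notes on version B (the rewrite author's own statement) =====
-- stated objective: simpler
-- what changed: B is a structural recursion: instead of A's precomputed min/max diagonal length and an index loop appending into an accumulator, B recurses on (row+1, column-1, connect_count-1) with a base case for exhausted count / bottom of board / left edge, consing each cell onto the recursive result.
import Mathlib
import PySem

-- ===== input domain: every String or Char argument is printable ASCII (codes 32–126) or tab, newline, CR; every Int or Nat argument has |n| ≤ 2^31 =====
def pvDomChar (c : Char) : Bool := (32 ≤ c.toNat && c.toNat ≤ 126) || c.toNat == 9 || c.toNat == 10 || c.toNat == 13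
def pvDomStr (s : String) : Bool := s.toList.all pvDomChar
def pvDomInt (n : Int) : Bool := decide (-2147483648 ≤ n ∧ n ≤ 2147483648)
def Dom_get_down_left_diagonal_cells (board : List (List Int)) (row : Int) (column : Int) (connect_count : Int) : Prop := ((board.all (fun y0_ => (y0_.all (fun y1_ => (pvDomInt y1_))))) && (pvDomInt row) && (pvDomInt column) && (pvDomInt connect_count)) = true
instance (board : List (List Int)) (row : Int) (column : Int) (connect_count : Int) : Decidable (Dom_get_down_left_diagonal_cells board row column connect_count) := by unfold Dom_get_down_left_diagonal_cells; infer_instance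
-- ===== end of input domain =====

-- B replaces A's precomputed-length loop with structural recursion on (row, column, connect_count)
-- that conses cells front-to-back (simpler decomposition, same cost).

-- ===== PORT A =====
def get_down_left_diagonal_cells (board : List (List Int)) (row : Int) (column : Int) (connect_count : Int) : List Int :=
  let down_index_max := min (row + connect_count - 1) ((board.length : Int) - 1)
  let left_index_min := max (column - connect_count + 1) 0
  let down_left_diagonal_range := min (down_index_max - row) (column - left_index_min)
  (PySem.List.pyRange 0 (down_left_diagonal_range + 1) 1).foldl
    (fun acc addition =>
      acc ++ [PySem.List.pyGetD (PySem.List.pyGetD board (row + addition) []) (column - addition) 0]) []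

-- ===== PORT B =====
-- Source B: base case returns [], otherwise cons the current cell onto the recursive call
-- with row+1, column-1, connect_count-1.
def get_down_left_diagonal_cells_alt (board : List (List Int)) (row : Int) (column : Int) (connect_count : Int) : List Int :=
  if connect_count ≤ 0 ∨ (board.length : Int) ≤ row ∨ column < 0 then []
  else PySem.List.pyGetD (PySem.List.pyGetD board row []) column 0 ::
       get_down_left_diagonal_cells_alt board (row + 1) (column - 1) (connect_count - 1)
termination_by connect_count.toNat
decreasing_by omega

-- ===== PRECONDITION & SPEC =====
-- Pre_ excludes exactly the inputs on which Python A raises an IndexError: some visited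
-- diagonal cell has a row index or a column index outside Python's (negative-wrapping) valid range.
def Pre_get_down_left_diagonal_cells (board : List (List Int)) (row : Int) (column : Int) (connect_count : Int) : Prop :=
  ∀ a ∈ List.range (min (connect_count - 1) (min ((board.length : Int) - 1 - row) column) + 1).toNat,
    PySem.Raise.InRange board.length (row + (a : Int)) ∧
    PySem.Raise.InRange (PySem.List.pyGetD board (row + (a : Int)) []).length (column - (a : Int))
instance (board : List (List Int)) (row : Int) (column : Int) (connect_count : Int) : Decidable (Pre_get_down_left_diagonal_cells board row column connect_count) := by unfold Pre_get_down_left_diagonal_cells; infer_instance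

def pvWitness_get_down_left_diagonal_cells : List (List Int) × Int × Int × Int :=
  ([[1, 2, 3], [4, 5, 6], [7, 8, 9]], 0, 2, 3)

def Spec_get_down_left_diagonal_cells (board : List (List Int)) (row : Int) (column : Int) (connect_count : Int) (out : List Int) : Prop := out = get_down_left_diagonal_cells_alt board row column connect_count
instance (board : List (List Int)) (row : Int) (column : Int) (connect_count : Int) (out : List Int) : Decidable (Spec_get_down_left_diagonal_cells board row column connect_count out) := by unfold Spec_get_down_left_diagonal_cells; infer_instance

-- ===== CLAIM =====
def Claim_equal_get_down_left_diagonal_cells : Prop := ∀ (board : List (List Int)) (row : Int) (column : Int) (connect_count : Int), Dom_get_down_left_diagonal_cells board row column connect_count → Pre_get_down_left_diagonal_cells board row column connect_count → Spec_get_down_left_diagonal_cells board row column connect_count (get_down_left_diagonal_cells board row column connect_count)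

-- ===== LEMMAS AND PROOFS =====
-- B's recursion produces the diagonal as a map over the index range 0..M, where
-- M = min (connect_count - 1) (min (len - 1 - row) column) is the last step taken.
theorem alt_eq_map (board : List (List Int)) (row column connect_count : Int) :
    get_down_left_diagonal_cells_alt board row column connect_count =
      (PySem.List.pyRange 0
          (min (connect_count - 1) (min ((board.length : Int) - 1 - row) column) + 1) 1).map
        (fun a => PySem.List.pyGetD (PySem.List.pyGetD board (row + a) []) (column - a) 0) := by
  rw [get_down_left_diagonal_cells_alt]
  split
  · rename_i h
    rw [PySem.List.pyRange_one_eq_nil (by omega)]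
    simp
  · rename_i h
    rw [alt_eq_map board (row + 1) (column - 1) (connect_count - 1)]
    rw [PySem.List.pyRange_one_cons
      (show (0 : Int) < min (connect_count - 1) (min ((board.length : Int) - 1 - row) column) + 1 by omega)]
    simp only [List.map_cons, add_zero, sub_zero]
    congr 1
    rw [PySem.List.pyRange_one, PySem.List.pyRange_one]
    rw [List.map_map, List.map_map]
    have hn : (min (connect_count - 1 - 1) (min ((board.length : Int) - 1 - (row + 1)) (column - 1)) + 1 - 0).toNat
        = (min (connect_count - 1) (min ((board.length : Int) - 1 - row) column) + 1 - 1).toNat := by omega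
    rw [hn]
    apply List.map_congr_left
    intro k _
    simp only [Function.comp]
    have h1 : row + 1 + (0 + (k : Int)) = row + (0 + 1 + (k : Int)) := by omega
    have h2 : column - 1 - (0 + (k : Int)) = column - (0 + 1 + (k : Int)) := by omega
    rw [h1, h2]
termination_by connect_count.toNat
decreasing_by omega

-- ===== VERDICT =====
theorem get_down_left_diagonal_cells_spec : Claim_equal_get_down_left_diagonal_cells := by
  intro board row column connect_count _ _
  simp only [Spec_get_down_left_diagonal_cells, get_down_left_diagonal_cells]
  have h : min (min (row + connect_count - 1) ((board.length : Int) - 1) - row)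
      (column - max (column - connect_count + 1) 0)
      = min (connect_count - 1) (min ((board.length : Int) - 1 - row) column) := by omega
  rw [alt_eq_map, PySem.List.foldl_append_singleton_eq_map, h, List.nil_append]
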